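-- pv_equiv track=rewrite | github.com/UIUC-ChenLab/OpenRTLSet | dataset_flow/Github_flow/Flow_2_New/Scan_Github_and_Extract.py | split_statements_semicolon
-- ===== SOURCE A (Python) =====
-- from typing import Dict, Iterable, Iterator, List, Optional, Set, Tuple
--
-- def split_statements_semicolon(text: str) -> List[str]:
--     parts = []
--     buf = []
--     for ch in text:
--         buf.append(ch)
--         if ch == ";":
--             parts.append("".join(buf))
--             buf = []
--     if buf:
--         parts.append("".join(buf))
--     return parts
-- ===== SOURCE B (Python) =====
-- from typing import List
--
-- def split_statements_semicolon(text: str) -> List[str]: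
--     parts = text.split(";")
--     out = [p + ";" for p in parts[:-1]]
--     if parts[-1]:
--         out.append(parts[-1])
--     return out
-- ===== Notes on version B (the rewrite author's own statement) =====
-- stated objective: simpler
-- what changed: Replaces the character-by-character buffer-accumulation loop with a single str.split on the delimiter followed by re-appending the delimiter to every piece but the last and keeping the last piece only if non-empty.
import Mathlib
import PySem

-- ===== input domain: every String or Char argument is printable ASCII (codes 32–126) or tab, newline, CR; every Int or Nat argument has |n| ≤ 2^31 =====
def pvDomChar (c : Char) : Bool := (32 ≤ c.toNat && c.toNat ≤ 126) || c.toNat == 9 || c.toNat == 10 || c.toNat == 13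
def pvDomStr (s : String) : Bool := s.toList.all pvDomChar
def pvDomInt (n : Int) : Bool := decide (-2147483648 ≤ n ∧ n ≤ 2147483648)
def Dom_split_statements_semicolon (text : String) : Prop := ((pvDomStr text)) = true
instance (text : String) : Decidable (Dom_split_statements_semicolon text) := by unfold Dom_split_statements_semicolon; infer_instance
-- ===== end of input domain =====

-- B replaces A's character-by-character buffer loop with split(';') then re-appending the
-- delimiter to every piece but the last (objective: simpler). Return value only; no mutation.

-- ===== PORT A =====
-- A: accumulate chars into buf, flush (with the ';') on each ';', flush trailing buf if non-empty.
def split_statements_semicolon (text : String) : List String :=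
  let st := text.toList.foldl
    (fun (st : List String × List Char) ch =>
      let buf := st.2 ++ [ch]
      if ch = ';' then (st.1 ++ [String.ofList buf], ([] : List Char)) else (st.1, buf))
    (([] : List String), ([] : List Char))
  if st.2.isEmpty then st.1 else st.1 ++ [String.ofList st.2]

-- ===== PORT B =====
-- B: parts = text.split(';'); [p + ';' for p in parts[:-1]] plus parts[-1] if non-empty.
def split_statements_semicolon_alt (text : String) : List String :=
  let parts := (PySem.Chars.splitOn text.toList ";".toList).map String.ofList
  parts.dropLast.map (fun p => p ++ ";")
    ++ (if parts.getLast! ≠ "" then [parts.getLast!] else [])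

-- ===== PRECONDITION & SPEC =====
def Spec_split_statements_semicolon (text : String) (out : List String) : Prop := out = split_statements_semicolon_alt text
instance (text : String) (out : List String) : Decidable (Spec_split_statements_semicolon text out) := by unfold Spec_split_statements_semicolon; infer_instance

-- ===== CLAIM (what is proved, stated in full; the proofs are below) =====
def Claim_equal_split_statements_semicolon : Prop := ∀ (text : String), Dom_split_statements_semicolon text → Spec_split_statements_semicolon text (split_statements_semicolon text)

-- ===== LEMMAS AND PROOFS =====

-- Reference splitter: Python's split(';') on char lists.
def splitSemi : List Char → List (List Char)
  | [] => [[]]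
  | c :: rest =>
    if c = ';' then [] :: splitSemi rest
    else
      match splitSemi rest with
      | [] => [[c]]
      | p :: ps => (c :: p) :: ps

theorem splitSemi_ne_nil (cs : List Char) : splitSemi cs ≠ [] := by
  cases cs with
  | nil => simp [splitSemi]
  | cons c rest =>
    simp only [splitSemi]
    split
    · simp
    · cases h : splitSemi rest <;> simp

theorem splitSemi_semi (rest : List Char) : splitSemi (';' :: rest) = [] :: splitSemi rest := by
  simp [splitSemi]

theorem splitSemi_other {c : Char} (hc : c ≠ ';') {p : List Char} {ps : List (List Char)}
    (rest : List Char) (h : splitSemi rest = p :: ps) :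
    splitSemi (c :: rest) = (c :: p) :: ps := by
  simp [splitSemi, hc, h]

-- prepend to the head chunk
def consHead (b : List Char) : List (List Char) → List (List Char)
  | [] => [b]
  | p :: ps => (b ++ p) :: ps

theorem splitOn_go_eq (fuel : Nat) (l cur : List Char) (acc : List (List Char))
    (h : l.length ≤ fuel) :
    PySem.Chars.splitOn.go (";".toList) fuel l cur acc
      = acc.reverse ++ consHead cur.reverse (splitSemi l) := by
  induction fuel generalizing l cur acc with
  | zero =>
    have : l = [] := by cases l <;> simp_all
    subst this
    simp [PySem.Chars.splitOn.go, splitSemi, consHead]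
  | succ f ih =>
    cases l with
    | nil => simp [PySem.Chars.splitOn.go, splitSemi, consHead]
    | cons c rest =>
      have hlen : rest.length ≤ f := by simpa using h
      by_cases hc : c = ';'
      · subst hc
        rw [show PySem.Chars.splitOn.go (";".toList) (f+1) (';' :: rest) cur acc
              = PySem.Chars.splitOn.go (";".toList) f rest [] (cur.reverse :: acc) by
            simp [PySem.Chars.splitOn.go, List.isPrefixOf]]
        rw [ih rest [] (cur.reverse :: acc) hlen]
        obtain ⟨p, ps, hrest⟩ : ∃ p ps, splitSemi rest = p :: ps := by
          cases hr : splitSemi rest with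
          | nil => exact absurd hr (splitSemi_ne_nil rest)
          | cons p ps => exact ⟨p, ps, rfl⟩
        simp [splitSemi_semi, hrest, consHead]
      · rw [show PySem.Chars.splitOn.go (";".toList) (f+1) (c :: rest) cur acc
              = PySem.Chars.splitOn.go (";".toList) f rest (c :: cur) acc by
            simp [PySem.Chars.splitOn.go, List.isPrefixOf]
            intro hcc
            exact absurd hcc.symm hc]
        rw [ih rest (c :: cur) acc hlen]
        obtain ⟨p, ps, hrest⟩ : ∃ p ps, splitSemi rest = p :: ps := by
          cases hr : splitSemi rest with
          | nil => exact absurd hr (splitSemi_ne_nil rest)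
          | cons p ps => exact ⟨p, ps, rfl⟩
        rw [splitSemi_other hc rest hrest]
        simp [hrest, consHead]

theorem splitOn_eq_splitSemi (cs : List Char) :
    PySem.Chars.splitOn cs (";".toList) = splitSemi cs := by
  rw [PySem.Chars.splitOn, splitOn_go_eq cs.length.succ cs [] [] (Nat.le_succ _)]
  cases h : splitSemi cs with
  | nil => exact absurd h (splitSemi_ne_nil cs)
  | cons p ps => simp [consHead]

-- Reference for A's loop: chunks with buf pending.
def chunkRef : List Char → List Char → List String
  | buf, [] => if buf.isEmpty then [] else [String.ofList buf]
  | buf, c :: rest =>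
    if c = ';' then String.ofList (buf ++ [c]) :: chunkRef [] rest
    else chunkRef (buf ++ [c]) rest

theorem foldA_eq_chunkRef (cs : List Char) (parts : List String) (buf : List Char) :
    (let st := cs.foldl
        (fun (st : List String × List Char) ch =>
          let b := st.2 ++ [ch]
          if ch = ';' then (st.1 ++ [String.ofList b], ([] : List Char)) else (st.1, b))
        (parts, buf)
     if st.2.isEmpty then st.1 else st.1 ++ [String.ofList st.2])
      = parts ++ chunkRef buf cs := by
  induction cs generalizing parts buf with
  | nil => cases buf <;> simp [chunkRef]
  | cons c rest ih =>
    by_cases hc : c = ';'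
    · subst hc
      simp only [List.foldl_cons, chunkRef, reduceIte]
      rw [ih]
      simp
    · simp only [List.foldl_cons, chunkRef, if_neg hc]
      rw [ih]

-- render a parts list the way B does, on char-list chunks
def render : List (List Char) → List String
  | ps => ps.dropLast.map (fun p => String.ofList (p ++ [';']))
      ++ (if ps.getLast! = [] then [] else [String.ofList ps.getLast!])

theorem getLast!_cons_cons {α : Type} [Inhabited α] (a b : α) (x : List α) :
    (a :: b :: x).getLast! = (b :: x).getLast! := by
  simp [List.getLast!]

theorem render_cons (p : List Char) (q : List (List Char)) (hq : q ≠ []) :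
    render (p :: q) = String.ofList (p ++ [';']) :: render q := by
  cases q with
  | nil => exact absurd rfl hq
  | cons r rs =>
    simp [render, List.dropLast_cons_of_ne_nil]

theorem chunkRef_eq_render (cs buf : List Char) :
    chunkRef buf cs = render (consHead buf (splitSemi cs)) := by
  induction cs generalizing buf with
  | nil =>
    by_cases hb : buf = [] <;>
      simp [chunkRef, splitSemi, consHead, render, hb]
  | cons c rest ih =>
    obtain ⟨p, ps, hrest⟩ : ∃ p ps, splitSemi rest = p :: ps := by
      cases hr : splitSemi rest with
      | nil => exact absurd hr (splitSemi_ne_nil rest)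
      | cons p ps => exact ⟨p, ps, rfl⟩
    by_cases hc : c = ';'
    · subst hc
      rw [splitSemi_semi]
      simp only [chunkRef, reduceIte]
      rw [ih []]
      rw [show consHead buf ([] :: splitSemi rest) = buf :: splitSemi rest by simp [consHead]]
      rw [render_cons buf (splitSemi rest) (splitSemi_ne_nil rest)]
      simp [consHead, hrest]
    · rw [splitSemi_other hc rest hrest]
      simp only [chunkRef, if_neg hc]
      rw [ih (buf ++ [c])]
      simp [consHead, hrest]

theorem render_map (ps : List (List Char)) (hne : ps ≠ []) :
    ((ps.map String.ofList).dropLast.map (fun p => p ++ ";")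
      ++ (if (ps.map String.ofList).getLast! ≠ "" then [(ps.map String.ofList).getLast!] else []))
      = render ps := by
  induction ps with
  | nil => exact absurd rfl hne
  | cons p qs ih =>
    cases qs with
    | nil =>
      by_cases hp : p = [] <;> simp [render, hp]
    | cons q rs =>
      simp only [List.map_cons] at ih ⊢
      rw [List.dropLast_cons_of_ne_nil (by simp), getLast!_cons_cons, List.map_cons,
        List.cons_append, ih (by simp)]
      rw [render_cons p (q :: rs) (by simp)]
      simp

-- ===== VERDICT (by name: the statement is the Claim_ definition above) =====
theorem split_statements_semicolon_spec : Claim_equal_split_statements_semicolon := by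
  intro text _
  unfold Spec_split_statements_semicolon split_statements_semicolon split_statements_semicolon_alt
  rw [splitOn_eq_splitSemi]
  rw [foldA_eq_chunkRef text.toList [] []]
  rw [chunkRef_eq_render]
  rw [show consHead [] (splitSemi text.toList) = splitSemi text.toList by
    cases h : splitSemi text.toList with
    | nil => exact absurd h (splitSemi_ne_nil _)
    | cons p ps => simp [consHead]]
  rw [render_map _ (splitSemi_ne_nil _)]
  simp
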